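-- pv_equiv track=rewrite | github.com/thebiodesignlab/burcin_outputs | DI_screen_MathonyDebug/processing.py | one_hot_insertion
-- ===== SOURCE A (Python) =====
-- def one_hot_insertion(seq, alphabet = 'ACDEFGHIKLMNPQRSTVWY'):
--     '''
--     one-hot encoding of AA strings
--     '''
--     # mapping of AAs to integers
--     AA_to_int = dict((c, i) for i, c in enumerate(alphabet))
--
--     # integer encode input data
--     integer_encoded = [AA_to_int[AA] for AA in seq]
--
--     # one hot encode
--     onehot_encoded = []
--     for idx, value in enumerate(integer_encoded):
--         letter = [0 for _ in range(len(alphabet))]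
--
--         letter[value] = 1
--         if idx < len(integer_encoded)-1:
--             letter[integer_encoded[idx+1]] = 1
--         onehot_encoded.append(letter)
--     return onehot_encoded, AA_to_int
-- ===== SOURCE B (Python) =====
-- def one_hot_insertion(seq, alphabet = 'ACDEFGHIKLMNPQRSTVWY'):
--     '''
--     one-hot encoding of AA strings, built column-major: one 0/1 column per
--     alphabet letter (1 where that letter is the residue or the next residue),
--     then transposed into per-position rows.
--     '''
--     aa_to_int = dict((c, i) for i, c in enumerate(alphabet))
--     enc = [aa_to_int[c] for c in seq]
--     n = len(enc)
--     cols = [[1 if enc[i] == j or (i + 1 < n and enc[i + 1] == j) else 0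
--              for i in range(n)]
--             for j in range(len(alphabet))]
--     rows = [[col[i] for col in cols] for i in range(n)]
--     return rows, aa_to_int
-- ===== Notes on version B (the rewrite author's own statement) =====
-- stated objective: alternative
-- what changed: Builds the matrix column-major -- for each alphabet letter a whole 0/1 column computed from a closed-form cell condition -- and then transposes into rows, instead of A's row loop that zeroes a row, mutates two bits and peeks at the next index.
import Mathlib
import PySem

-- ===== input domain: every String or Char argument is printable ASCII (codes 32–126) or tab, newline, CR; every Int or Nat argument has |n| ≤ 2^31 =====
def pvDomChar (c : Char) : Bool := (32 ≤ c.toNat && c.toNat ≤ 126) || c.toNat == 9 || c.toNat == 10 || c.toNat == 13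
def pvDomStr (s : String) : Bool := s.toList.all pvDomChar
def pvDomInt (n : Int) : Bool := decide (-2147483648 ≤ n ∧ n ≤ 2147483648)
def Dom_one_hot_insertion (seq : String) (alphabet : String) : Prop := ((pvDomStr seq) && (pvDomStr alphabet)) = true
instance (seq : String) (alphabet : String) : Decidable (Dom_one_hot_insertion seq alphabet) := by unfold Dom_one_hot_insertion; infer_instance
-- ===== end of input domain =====

-- B builds the matrix column-major (one 0/1 column per alphabet letter from a closed-form cell
-- condition) and then transposes into rows, instead of A's row loop mutating two bits; same cost.

-- ===== PORT A =====
-- AA_to_int = dict((c, i) for i, c in enumerate(alphabet))  (shared line: B's python builds the same dict)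
def pvAAMap (alphabet : String) : PySem.Dict String Int :=
  PySem.Dict.ofList ((PySem.List.enumerate alphabet.toList 0).map (fun p => (String.mk [p.2], p.1)))

-- integer_encoded = [AA_to_int[AA] for AA in seq]  (KeyError when a seq char is absent: excluded by Pre_)
def pvIntEncode (seq : String) (alphabet : String) : List Int :=
  seq.toList.map (fun AA => (pvAAMap alphabet).getD (String.mk [AA]) 0)

def one_hot_insertion (seq : String) (alphabet : String) : List (List Int) × (List (String × Int)) :=
  let AA_to_int := pvAAMap alphabet
  let integer_encoded := pvIntEncode seq alphabet
  let onehot_encoded := (PySem.List.enumerate integer_encoded 0).foldl (fun acc p =>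
    let letter := (PySem.List.pyRange 0 (alphabet.toList.length : Int) 1).map (fun _ => (0 : Int))
    let letter := PySem.List.pySetD letter p.2 1
    let letter := if p.1 < (integer_encoded.length : Int) - 1
      then PySem.List.pySetD letter (PySem.List.pyGetD integer_encoded (p.1 + 1) 0) 1
      else letter
    acc ++ [letter]) []
  (onehot_encoded, AA_to_int.items)

-- ===== PORT B =====
-- cols = [[1 if enc[i] == j or (i+1 < n and enc[i+1] == j) else 0 for i in range(n)] for j in range(len(alphabet))]
-- rows = [[col[i] for col in cols] for i in range(n)]
def one_hot_insertion_alt (seq : String) (alphabet : String) : List (List Int) × (List (String × Int)) :=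
  let aa_to_int := pvAAMap alphabet
  let enc := pvIntEncode seq alphabet
  let n := enc.length
  let cols := (PySem.List.pyRange 0 (alphabet.toList.length : Int) 1).map (fun j =>
    (PySem.List.pyRange 0 (n : Int) 1).map (fun i =>
      if PySem.List.pyGetD enc i 0 = j ∨ ((i + 1 < (n : Int)) ∧ PySem.List.pyGetD enc (i + 1) 0 = j)
      then (1 : Int) else 0))
  let rows := (PySem.List.pyRange 0 (n : Int) 1).map (fun i =>
    cols.map (fun col => PySem.List.pyGetD col i 0))
  (rows, aa_to_int.items)

-- ===== PRECONDITION & SPEC =====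
-- Pre_ excludes exactly the seq characters absent from the alphabet, where A's dict lookup raises KeyError.
def Pre_one_hot_insertion (seq : String) (alphabet : String) : Prop :=
  (seq.toList.all (fun c => alphabet.toList.contains c)) = true
instance (seq : String) (alphabet : String) : Decidable (Pre_one_hot_insertion seq alphabet) := by
  unfold Pre_one_hot_insertion; infer_instance

def pvWitness_one_hot_insertion : String × String := ("ACCA", "AC")

def Spec_one_hot_insertion (seq : String) (alphabet : String) (out : List (List Int) × (List (String × Int))) : Prop := out = one_hot_insertion_alt seq alphabet
instance (seq : String) (alphabet : String) (out : List (List Int) × (List (String × Int))) : Decidable (Spec_one_hot_insertion seq alphabet out) := by unfold Spec_one_hot_insertion; infer_instance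

-- ===== CLAIM (what is proved, stated in full; the proofs are below) =====
def Claim_equal_one_hot_insertion : Prop := ∀ (seq : String) (alphabet : String), Dom_one_hot_insertion seq alphabet → Pre_one_hot_insertion seq alphabet → Spec_one_hot_insertion seq alphabet (one_hot_insertion seq alphabet)

-- ===== LEMMAS AND PROOFS =====

-- each value stored by a foldl-insert loop is one of the inserted values or was already present
theorem pv_values_foldl_insert (ps : List (String × Int)) (d : PySem.Dict String Int) :
    ∀ w ∈ (ps.foldl (fun d p => d.insert p.1 p.2) d).values, w ∈ ps.map (·.2) ∨ w ∈ d.values := by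
  induction ps generalizing d with
  | nil => intro w hw; exact Or.inr hw
  | cons p ps ih =>
    intro w hw
    rcases ih (d.insert p.1 p.2) w hw with h | h
    · exact Or.inl (by simp at h ⊢; tauto)
    · rcases PySem.Dict.mem_values_insert _ _ _ _ h with h | h
      · exact Or.inl (by simp [h])
      · exact Or.inr h

theorem pv_aaMap_values_nonneg (alphabet : String) :
    ∀ w ∈ (pvAAMap alphabet).values, 0 ≤ w := by
  intro w hw
  have : pvAAMap alphabet =
      ((PySem.List.enumerate alphabet.toList 0).map (fun p => (String.mk [p.2], p.1))).foldl
        (fun d p => d.insert p.1 p.2) PySem.Dict.empty := rfl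
  rw [this] at hw
  rcases pv_values_foldl_insert _ _ w hw with h | h
  · simp only [List.map_map, List.mem_map] at h
    obtain ⟨q, hq, rfl⟩ := h
    rw [PySem.List.mem_enumerate_iff] at hq
    obtain ⟨k, hk, rfl⟩ := hq
    simp
  · simp [PySem.Dict.values, PySem.Dict.empty] at h

theorem pv_intEncode_nonneg (seq alphabet : String) :
    ∀ v ∈ pvIntEncode seq alphabet, 0 ≤ v := by
  intro v hv
  simp only [pvIntEncode, List.mem_map] at hv
  obtain ⟨c, _, rfl⟩ := hv
  rw [PySem.Dict.getD_eq_get?_getD]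
  cases hg : (pvAAMap alphabet).get? (String.mk [c]) with
  | none => simp
  | some w =>
    have := PySem.Dict.mem_items_of_get?_eq_some _ hg
    exact pv_aaMap_values_nonneg alphabet w (List.mem_map_of_mem this)

-- A's "zero row then set own bit", for a nonnegative value, is an indicator row
theorem pv_one_set (m : Nat) (v : Int) (hv : 0 ≤ v) :
    PySem.List.pySetD ((PySem.List.pyRange 0 (m : Int) 1).map (fun _ => (0 : Int))) v 1 =
      (PySem.List.pyRange 0 (m : Int) 1).map (fun j => if v = j then (1 : Int) else 0) := by
  rw [PySem.List.pySetD_of_nonneg _ _ hv, PySem.List.pyRange_zero_natCast]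
  apply List.ext_getElem
  · simp
  · intro i h1 h2
    simp only [List.map_map, List.getElem_map, List.getElem_range, Function.comp]
    rw [List.getElem_set]
    simp only [List.getElem_map, List.getElem_range]
    have : (v.toNat = i) ↔ (v = (i : Int)) := by omega
    simp [this]

-- A's "zero row, set own bit, set successor bit" is a two-point indicator row
theorem pv_two_set (m : Nat) (v w : Int) (hv : 0 ≤ v) (hw : 0 ≤ w) :
    PySem.List.pySetD (PySem.List.pySetD ((PySem.List.pyRange 0 (m : Int) 1).map (fun _ => (0 : Int))) v 1) w 1 =
      (PySem.List.pyRange 0 (m : Int) 1).map (fun j => if v = j ∨ w = j then (1 : Int) else 0) := by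
  rw [PySem.List.pySetD_of_nonneg _ _ hv, PySem.List.pySetD_of_nonneg _ _ hw,
    PySem.List.pyRange_zero_natCast]
  apply List.ext_getElem
  · simp
  · intro i h1 h2
    simp only [List.map_map, List.getElem_map, List.getElem_range, Function.comp]
    rw [List.getElem_set, List.getElem_set]
    simp only [List.getElem_map, List.getElem_range]
    by_cases hiw : w = (i : Int)
    · simp [hiw]
    · rw [if_neg (by omega)]
      by_cases hiv : v = (i : Int)
      · simp [hiv]
      · rw [if_neg (by omega)]
        simp [hiv, hiw]

-- B's row i, extracted from the columns, is the same two-point indicator row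
theorem pv_alt_row (enc : List Int) (m k : Nat) (hk : k < enc.length) :
    ((PySem.List.pyRange 0 (m : Int) 1).map (fun j =>
        (PySem.List.pyRange 0 (enc.length : Int) 1).map (fun i =>
          if PySem.List.pyGetD enc i 0 = j ∨ ((i + 1 < (enc.length : Int)) ∧ PySem.List.pyGetD enc (i + 1) 0 = j)
          then (1 : Int) else 0))).map (fun col => PySem.List.pyGetD col ((k : Int)) 0) =
      (PySem.List.pyRange 0 (m : Int) 1).map (fun j =>
        if enc[k] = j ∨ ((k + 1 < enc.length) ∧ enc.getD (k + 1) 0 = j) then (1 : Int) else 0) := by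
  rw [List.map_map]
  apply List.map_congr_left
  intro j _
  simp only [Function.comp]
  rw [PySem.List.pyGetD_natCast, List.getD_eq_getElem _ _ (by simp [PySem.List.length_pyRange_one]; omega)]
  simp only [List.getElem_map, PySem.List.getElem_pyRange_one, zero_add]
  rw [show (k : Int) + 1 = ((k + 1 : Nat) : Int) by push_cast; ring, PySem.List.pyGetD_natCast,
    PySem.List.pyGetD_natCast, List.getD_eq_getElem _ _ hk]
  congr 1
  have hc : ((k : Int) + 1 < (enc.length : Int)) ↔ (k + 1 < enc.length) := by omega
  simp [hc]

theorem pv_fst_eq (seq alphabet : String) :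
    (one_hot_insertion seq alphabet).1 = (one_hot_insertion_alt seq alphabet).1 := by
  simp only [one_hot_insertion, one_hot_insertion_alt]
  set enc := pvIntEncode seq alphabet with henc
  set m := alphabet.toList.length with hm
  have hnn : ∀ v ∈ enc, 0 ≤ v := pv_intEncode_nonneg seq alphabet
  rw [PySem.List.foldl_append_singleton_eq_map]
  apply List.ext_getElem
  · simp [PySem.List.length_enumerate, PySem.List.length_pyRange_one]
  · intro k h1 h2
    have hk : k < enc.length := by simpa [PySem.List.length_enumerate] using h1
    simp only [List.nil_append, List.getElem_map, PySem.List.getElem_enumerate,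
      PySem.List.getElem_pyRange_one, zero_add]
    rw [pv_alt_row enc m k hk]
    by_cases hlt : k + 1 < enc.length
    · rw [if_pos (by omega)]
      have hget : PySem.List.pyGetD enc ((k : Int) + 1) 0 = enc[k + 1] := by
        rw [show (k : Int) + 1 = ((k + 1 : Nat) : Int) by push_cast; ring]
        rw [PySem.List.pyGetD_natCast, List.getD_eq_getElem _ _ hlt]
      rw [hget, pv_two_set m (enc[k]) (enc[k + 1]) (hnn _ (List.getElem_mem hk)) (hnn _ (List.getElem_mem hlt))]
      apply List.map_congr_left
      intro j _
      rw [List.getD_eq_getElem _ _ hlt]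
      simp [hlt]
    · rw [if_neg (by omega)]
      rw [pv_one_set m (enc[k]) (hnn _ (List.getElem_mem hk))]
      apply List.map_congr_left
      intro j _
      simp [hlt]

-- ===== VERDICT (by name: the statement is the Claim_ definition above) =====
theorem one_hot_insertion_spec : Claim_equal_one_hot_insertion := by
  intro seq alphabet _ _
  show one_hot_insertion seq alphabet = one_hot_insertion_alt seq alphabet
  exact Prod.ext (pv_fst_eq seq alphabet) rfl
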